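-- pv_equiv track=rewrite | github.com/CodeCommandante/hamming-error-correction | Utilities.py | getHMatrixShape
-- ===== SOURCE A (Python) =====
-- def getHMatrixShape(PBitMatrix, DataBits):
--     """
--     Helper function that describes the shape (width and height) of the H-matrix,
--     based on the number of databits in the original message.
--
--     Parameters
--     ----------
--     PBitMatrix : TYPE 2D array
--         DESCRIPTION.  The table generated at the beginning of the program.
--     DataBits : TYPE integer
--         DESCRIPTION.  The number of data bits in the original message.
--
--     Returns
--     -------
--     Width : integer
--         The width of the new H-matrix.
--     Height : integer
--         The height of the new H-matrix.
--
--     """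
--     Width = 0
--     Height = 0
--     Num = 0
--     while( Num < DataBits):
--         if(PBitMatrix[0][Width+1] == 0):
--             Num = Num + 1
--         else:
--             Height = Height + 1
--         Width = Width + 1
--     return Width, Height
-- ===== SOURCE B (Python) =====
-- def getHMatrixShape(PBitMatrix, DataBits):
--     if DataBits <= 0:
--         return 0, 0
--     zeros = [i for i, v in enumerate(PBitMatrix[0]) if i >= 1 and v == 0]
--     width = zeros[DataBits - 1]
--     return width, width - DataBits
-- ===== Notes on version B (the rewrite author's own statement) =====
-- stated objective: simpler
-- what changed: Replaced A's stateful while loop (three mutable counters Width/Height/Num advanced per element) by two stages: a comprehension collecting the positions of all zeros at indices >= 1, then direct indexing zeros[DataBits-1] for Width, with Height given by the closed form Width - DataBits.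
import Mathlib
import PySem

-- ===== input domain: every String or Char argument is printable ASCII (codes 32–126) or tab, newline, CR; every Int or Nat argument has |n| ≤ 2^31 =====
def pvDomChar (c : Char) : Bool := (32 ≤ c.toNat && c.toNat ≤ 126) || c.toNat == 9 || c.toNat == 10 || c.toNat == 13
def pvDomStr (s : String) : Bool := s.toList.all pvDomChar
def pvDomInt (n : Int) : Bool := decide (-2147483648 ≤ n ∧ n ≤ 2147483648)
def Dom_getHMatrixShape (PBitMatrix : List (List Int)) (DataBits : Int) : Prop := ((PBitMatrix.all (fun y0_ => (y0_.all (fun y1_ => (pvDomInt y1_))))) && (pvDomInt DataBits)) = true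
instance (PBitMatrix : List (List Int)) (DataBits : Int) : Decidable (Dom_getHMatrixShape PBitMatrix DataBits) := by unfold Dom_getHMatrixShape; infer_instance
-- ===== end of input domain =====

-- B replaces A's stateful while loop by two stages: collect all zero positions (indices >= 1)
-- of row 0 in a list, then index that list at DataBits-1; Height is the closed form
-- Width - DataBits (simpler).

-- ===== PORT A =====
-- A's while loop, fueled (fuel row.length+1 outlasts the loop: every step moves the index
-- Width+1 forward, and on an out-of-range index Python raises — the 'none' branch, excluded by Pre_).
def pvGoA (row : List Int) (DataBits : Int) : Nat → Int → Int → Int → Int × Int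
  | 0, W, H, _ => (W, H)
  | fuel+1, W, H, Num =>
    if Num < DataBits then
      match PySem.List.pyGet? row (W + 1) with
      | none => (W, H)   -- IndexError in Python; unreachable under Pre_
      | some v =>
        if v = 0 then pvGoA row DataBits fuel (W + 1) H (Num + 1)
        else pvGoA row DataBits fuel (W + 1) (H + 1) Num
    else (W, H)

def getHMatrixShape (PBitMatrix : List (List Int)) (DataBits : Int) : Int × Int :=
  pvGoA (PBitMatrix.headD []) DataBits ((PBitMatrix.headD []).length + 1) 0 0 0

-- ===== PORT B =====
-- B's comprehension: positions of the zeros of the row at indices >= 1.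
def pvZeros (l : List Int) (p : Int) : List Int :=
  ((PySem.List.enumerate l p).filter (fun q => decide (1 ≤ q.1) && decide (q.2 = 0))).map Prod.fst

-- B's 'zeros[DataBits-1]'; falling off the end (IndexError in Python B, outside Pre_) yields (0, 0).
def getHMatrixShape_alt (PBitMatrix : List (List Int)) (DataBits : Int) : Int × Int :=
  if DataBits ≤ 0 then (0, 0)
  else
    match PySem.List.pyGet? (pvZeros (PBitMatrix.headD []) 0) (DataBits - 1) with
    | none => (0, 0)   -- IndexError in Python; unreachable under Pre_
    | some w => (w, w - DataBits)

-- ===== PRECONDITION & SPEC =====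
-- Pre_ excludes exactly the inputs where A raises IndexError: DataBits > 0 while the first row
-- (or the matrix itself) is missing the DataBits-th zero among positions ≥ 1.
def Pre_getHMatrixShape (PBitMatrix : List (List Int)) (DataBits : Int) : Prop :=
  DataBits ≤ 0 ∨ (PBitMatrix ≠ [] ∧ DataBits ≤ (((PBitMatrix.headD []).drop 1).count 0 : Int))
instance (PBitMatrix : List (List Int)) (DataBits : Int) : Decidable (Pre_getHMatrixShape PBitMatrix DataBits) := by unfold Pre_getHMatrixShape; infer_instance

def pvWitness_getHMatrixShape : List (List Int) × Int := ([[1, 0, 0]], 2)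

def Spec_getHMatrixShape (PBitMatrix : List (List Int)) (DataBits : Int) (out : Int × Int) : Prop := out = getHMatrixShape_alt PBitMatrix DataBits
instance (PBitMatrix : List (List Int)) (DataBits : Int) (out : Int × Int) : Decidable (Spec_getHMatrixShape PBitMatrix DataBits out) := by unfold Spec_getHMatrixShape; infer_instance

-- ===== CLAIM (what is proved, stated in full; the proofs are below) =====
def Claim_equal_getHMatrixShape : Prop := ∀ (PBitMatrix : List (List Int)) (DataBits : Int), Dom_getHMatrixShape PBitMatrix DataBits → Pre_getHMatrixShape PBitMatrix DataBits → Spec_getHMatrixShape PBitMatrix DataBits (getHMatrixShape PBitMatrix DataBits)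

-- ===== LEMMAS AND PROOFS =====

-- A's loop returns its current (W, H) as soon as Num < DataBits fails, at any fuel.
theorem pvGoA_done (row : List Int) (DB : Int) (fuel : Nat) (W H Num : Int)
    (h : ¬ Num < DB) : pvGoA row DB fuel W H Num = (W, H) := by
  cases fuel <;> simp [pvGoA, h]

-- Loop correspondence: A's state (W, H, Num) at row position p = W + 1 versus B's zero-position
-- list of the remaining suffix l = row.drop p, under the invariant H = W - Num; the loop ends at
-- the (DB - Num)-th remaining zero, i.e. element k = DB - Num - 1 of pvZeros l p.
theorem pvGo_agree (DB : Int) (l : List Int) : ∀ (row : List Int) (p : Nat) (W H Num : Int) (fuel k : Nat),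
    row.drop p = l → (W : Int) + 1 = (p : Int) → 1 ≤ p → H = W - Num → Num < DB →
    (k : Int) = DB - Num - 1 → DB - Num ≤ (l.count 0 : Int) → l.length + 1 ≤ fuel →
    ∃ w, (pvZeros l (p : Int))[k]? = some w ∧ pvGoA row DB fuel W H Num = (w, w - DB) := by
  induction l with
  | nil =>
      intro row p W H Num fuel k _ _ _ _ hlt _ hcnt _
      simp at hcnt; omega
  | cons v t ih =>
      intro row p W H Num fuel k hdrop hWp hp hH hlt hk hcnt hfuel
      obtain ⟨fuel, rfl⟩ : ∃ g, fuel = g + 1 := ⟨fuel - 1, by omega⟩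
      have hget : PySem.List.pyGet? row (W + 1) = some v := by
        rw [hWp, PySem.List.pyGet?_natCast]
        have h0 : row[p]? = (row.drop p)[0]? := by
          rw [List.getElem?_drop]; simp
        rw [h0, hdrop]; rfl
      have hdrop' : row.drop (p + 1) = t := by
        have h1 : row.drop (p + 1) = (row.drop p).drop 1 := by rw [List.drop_drop]
        rw [h1, hdrop]; rfl
      have hip : (1 : Int) ≤ (p : Nat) := by exact_mod_cast hp
      simp only [pvGoA, if_pos hlt, hget]
      by_cases hv : v = 0
      · have hz : pvZeros (v :: t) (p : Int) = (p : Int) :: pvZeros t ((p : Int) + 1) := by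
          simp [pvZeros, PySem.List.enumerate_cons, hip, hv]
        by_cases hend : Num + 1 = DB
        · -- DataBits reached: A returns (W+1, H) = (p, p - DB); B's element 0 is p itself.
          have hk0 : k = 0 := by omega
          refine ⟨(p : Int), by simp [hz, hk0], ?_⟩
          rw [if_pos hv, pvGoA_done row DB fuel (W+1) H (Num+1) (by omega)]
          simp only [Prod.mk.injEq]; constructor <;> omega
        · -- a zero, scan continues: element k of p :: rest is element k-1 of rest.
          obtain ⟨k, rfl⟩ : ∃ j, k = j + 1 := ⟨k - 1, by omega⟩
          obtain ⟨w, hw, hgo⟩ := ih row (p + 1) (W + 1) H (Num + 1) fuel k hdrop'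
            (by push_cast; omega) (by omega) (by omega) (by omega) (by push_cast at hk ⊢; omega)
            (by simp [hv] at hcnt ⊢; omega) (by simp at hfuel ⊢; omega)
          refine ⟨w, ?_, by rw [if_pos hv]; simpa using hgo⟩
          rw [hz]; simpa using hw
      · -- nonzero: A bumps Height, the comprehension drops the pair.
        have hz : pvZeros (v :: t) (p : Int) = pvZeros t ((p : Int) + 1) := by
          simp [pvZeros, PySem.List.enumerate_cons, hv]
        obtain ⟨w, hw, hgo⟩ := ih row (p + 1) (W + 1) (H + 1) Num fuel k hdrop'
          (by push_cast; omega) (by omega) (by omega) hlt hk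
          (by simp [hv] at hcnt ⊢; omega) (by simp at hfuel ⊢; omega)
        refine ⟨w, by rw [hz]; simpa using hw, by rw [if_neg hv]; simpa using hgo⟩

-- The comprehension skips index 0 (the 'i >= 1' test), so it equals the list for the suffix from 1.
theorem pvZeros_skip0 (row : List Int) :
    pvZeros row 0 = pvZeros (row.drop 1) 1 := by
  cases row with
  | nil => rfl
  | cons v t => simp [pvZeros, PySem.List.enumerate_cons]

-- ===== VERDICT (by name: the statement is the Claim_ definition above) =====
theorem getHMatrixShape_spec : Claim_equal_getHMatrixShape := by
  intro PB DB _ hpre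
  unfold Spec_getHMatrixShape getHMatrixShape getHMatrixShape_alt
  by_cases hz : DB ≤ 0
  · rw [if_pos hz, pvGoA_done _ _ _ _ _ _ (by omega)]
  · rw [if_neg hz]
    rcases hpre with h | ⟨_, hcnt⟩
    · omega
    · obtain ⟨k, hk⟩ : ∃ k : Nat, (k : Int) = DB - 1 := ⟨(DB - 1).toNat, by omega⟩
      obtain ⟨w, hw, hgo⟩ := pvGo_agree DB ((PB.headD []).drop 1) (PB.headD []) 1 0 0 0
        ((PB.headD []).length + 1) k rfl (by norm_num) (by omega) (by ring)
        (by omega) (by omega) (by omega) (by simp)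
      rw [pvZeros_skip0, ← hk, PySem.List.pyGet?_natCast]
      push_cast at hw
      rw [hw, hgo]
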